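-- pv_equiv track=rewrite | github.com/ttogle918/KOCRUIT | agent/agents/chatbot_node.py | _find_related_field_groups
-- ===== SOURCE A (Python) =====
-- from typing import Dict, Any
--
-- def _find_related_field_groups(inputs: list) -> Dict[str, list]:
--     """이름 패턴을 기반으로 관련 필드들을 그룹화"""
--     related_groups = {}
--
--     # 일반적인 필드 그룹 패턴
--     group_patterns = {
--         "개인정보": ["name", "email", "phone", "address", "birth", "gender"],
--         "회사정보": ["company", "department", "position", "employee"],
--         "계정정보": ["username", "password", "confirm", "login"],
--         "주소정보": ["address", "city", "state", "zip", "country"],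
--         "날짜시간": ["date", "time", "start", "end", "schedule"],
--         "금액정보": ["salary", "price", "amount", "cost", "budget"]
--     }
--
--     for pattern_name, keywords in group_patterns.items():
--         matching_fields = []
--         for input_elem in inputs:
--             field_name = input_elem.get("name", "").lower()
--             field_label = input_elem.get("label", "").lower()
--
--             # 키워드와 매칭되는지 확인
--             for keyword in keywords:
--                 if keyword in field_name or keyword in field_label:
--                     matching_fields.append(input_elem)
--                     break
--
--         if matching_fields:
--             related_groups[pattern_name] = matching_fields
--
--     return related_groups
-- ===== SOURCE B (Python) =====
-- from typing import Dict, Any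
--
-- def _find_related_field_groups(inputs: list) -> Dict[str, list]:
--     """Two-stage pipeline: tag each field once with an integer bitmask of the groups
--     it matches (via a flattened keyword->group-index table), then build the result
--     with pure bit tests, no further string work."""
--     patterns = [
--         ("개인정보", ["name", "email", "phone", "address", "birth", "gender"]),
--         ("회사정보", ["company", "department", "position", "employee"]),
--         ("계정정보", ["username", "password", "confirm", "login"]),
--         ("주소정보", ["address", "city", "state", "zip", "country"]),
--         ("날짜시간", ["date", "time", "start", "end", "schedule"]),
--         ("금액정보", ["salary", "price", "amount", "cost", "budget"]),
--     ]
--     flat = [(i, kw) for i, (_, kws) in enumerate(patterns) for kw in kws]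
--     tagged = []
--     for e in inputs:
--         name = e.get("name", "").lower()
--         label = e.get("label", "").lower()
--         mask = 0
--         for i, kw in flat:
--             if not ((mask >> i) & 1) and (kw in name or kw in label):
--                 mask |= 1 << i
--         tagged.append((mask, e))
--     pairs = []
--     for i, (pname, _) in enumerate(patterns):
--         group = [e for m, e in tagged if (m >> i) & 1]
--         if group:
--             pairs.append((pname, group))
--     return dict(pairs)
-- ===== Notes on version B (the rewrite author's own statement) =====
-- stated objective: alternative
-- what changed: A scans `inputs` six times, once per group, re-lowercasing and re-testing every field against that group's keywords; B is a two-stage pipeline over a different representation: one pass tags each field with an integer bitmask of all matching groups (driven by a flattened (group-index, keyword) table that skips keywords of already-matched groups), and a second pass assembles the result dict with pure bit tests, no string work.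
import Mathlib
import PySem

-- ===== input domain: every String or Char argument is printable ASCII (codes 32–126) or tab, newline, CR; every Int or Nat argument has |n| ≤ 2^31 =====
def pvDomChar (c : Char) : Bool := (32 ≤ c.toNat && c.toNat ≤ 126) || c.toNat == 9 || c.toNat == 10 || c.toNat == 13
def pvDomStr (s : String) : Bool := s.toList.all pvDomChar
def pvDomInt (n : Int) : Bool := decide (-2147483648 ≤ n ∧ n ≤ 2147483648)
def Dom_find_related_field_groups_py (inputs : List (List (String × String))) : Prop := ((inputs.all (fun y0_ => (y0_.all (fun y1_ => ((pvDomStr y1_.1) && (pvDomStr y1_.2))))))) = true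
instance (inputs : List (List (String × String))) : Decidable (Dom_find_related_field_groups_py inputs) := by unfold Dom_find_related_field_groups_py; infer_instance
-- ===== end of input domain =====

-- B replaces A's six per-group scans (each re-testing every field against the group's
-- keywords) by a two-stage pipeline: one pass tags each field with an integer bitmask of
-- matching groups via a flattened keyword→group-index table, a second pass builds the
-- result with pure bit tests (objective: alternative algorithm/data structure, same result).

-- the literal `group_patterns` table, shared data of both ports
def pvGroupPatterns : List (String × List String) :=
  [("개인정보", ["name", "email", "phone", "address", "birth", "gender"]),
   ("회사정보", ["company", "department", "position", "employee"]),
   ("계정정보", ["username", "password", "confirm", "login"]),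
   ("주소정보", ["address", "city", "state", "zip", "country"]),
   ("날짜시간", ["date", "time", "start", "end", "schedule"]),
   ("금액정보", ["salary", "price", "amount", "cost", "budget"])]

-- ===== PORT A =====
def find_related_field_groups_py (inputs : List (List (String × String))) : List (String × List (List (String × String))) :=
  (pvGroupPatterns.foldl (fun related_groups pat =>
      let matching_fields := inputs.foldl (fun mf input_elem =>
        let field_name := PySem.Str.lower ((PySem.Dict.mk input_elem).getD "name" "")
        let field_label := PySem.Str.lower ((PySem.Dict.mk input_elem).getD "label" "")
        if pat.2.any (fun keyword => PySem.Str.isIn keyword field_name || PySem.Str.isIn keyword field_label)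
        then mf ++ [input_elem] else mf) []
      if matching_fields ≠ [] then related_groups.insert pat.1 matching_fields else related_groups)
    PySem.Dict.empty).items

-- ===== PORT B =====
-- Source B's flattened (group index, keyword) table: [(i, kw) for i, (_, kws) in enumerate(patterns) for kw in kws]
def pvFlat : List (Int × String) :=
  (PySem.List.enumerate pvGroupPatterns).flatMap (fun ip => ip.2.2.map (fun kw => (ip.1, kw)))

-- Source B's inner mask loop over `flat` (indices are the literal 0..5, nonnegative, so `.toNat` is exact)
def pvMaskOf (name label : String) : Nat :=
  pvFlat.foldl (fun mask p =>
    if !(mask.testBit p.1.toNat) && (PySem.Str.isIn p.2 name || PySem.Str.isIn p.2 label)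
    then mask ||| (1 <<< p.1.toNat) else mask) 0

def find_related_field_groups_py_alt (inputs : List (List (String × String))) : List (String × List (List (String × String))) :=
  let tagged := inputs.foldl (fun tagged e =>
      let name := PySem.Str.lower ((PySem.Dict.mk e).getD "name" "")
      let label := PySem.Str.lower ((PySem.Dict.mk e).getD "label" "")
      tagged ++ [(pvMaskOf name label, e)]) []
  ((PySem.List.enumerate pvGroupPatterns).foldl (fun result ip =>
      let group := (tagged.filter (fun me => me.1.testBit ip.1.toNat)).map Prod.snd
      if group ≠ [] then result.insert ip.2.1 group else result)
    PySem.Dict.empty).items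

-- ===== PRECONDITION & SPEC =====
def Spec_find_related_field_groups_py (inputs : List (List (String × String))) (out : List (String × List (List (String × String)))) : Prop := out = find_related_field_groups_py_alt inputs
instance (inputs : List (List (String × String))) (out : List (String × List (List (String × String)))) : Decidable (Spec_find_related_field_groups_py inputs out) := by unfold Spec_find_related_field_groups_py; infer_instance

-- ===== CLAIM (what is proved, stated in full; the proofs are below) =====
def Claim_equal_find_related_field_groups_py : Prop := ∀ (inputs : List (List (String × String))), Dom_find_related_field_groups_py inputs → Spec_find_related_field_groups_py inputs (find_related_field_groups_py inputs)

-- ===== LEMMAS AND PROOFS =====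

def pvName (e : List (String × String)) : String := PySem.Str.lower ((PySem.Dict.mk e).getD "name" "")
def pvLabel (e : List (String × String)) : String := PySem.Str.lower ((PySem.Dict.mk e).getD "label" "")

-- the per-field predicate both programs decide for a keyword list
def pvMatch (kws : List String) (e : List (String × String)) : Bool :=
  kws.any (fun k => PySem.Str.isIn k (pvName e) || PySem.Str.isIn k (pvLabel e))

-- A's inner loop over `inputs` is the filter by pvMatch
theorem pvA_inner (kws : List String) (inputs : List (List (String × String))) :
    inputs.foldl (fun mf input_elem =>
        let field_name := PySem.Str.lower ((PySem.Dict.mk input_elem).getD "name" "")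
        let field_label := PySem.Str.lower ((PySem.Dict.mk input_elem).getD "label" "")
        if kws.any (fun keyword => PySem.Str.isIn keyword field_name || PySem.Str.isIn keyword field_label)
        then mf ++ [input_elem] else mf) []
      = inputs.filter (pvMatch kws) := by
  have h := PySem.List.foldl_append_if (pvMatch kws) (fun x => x) inputs []
  simpa [pvMatch, pvName, pvLabel, List.map_id] using h

-- conditional inserts of fresh distinct keys append in order
theorem pv_insert_fold {α : Type} (key : α → String) (val : α → List (List (String × String)))
    (ps : List α) (d : PySem.Dict String (List (List (String × String))))
    (hfresh : ∀ p ∈ ps, d.contains (key p) = false) (hnd : (ps.map key).Nodup) :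
    (ps.foldl (fun rg p => if val p ≠ [] then rg.insert (key p) (val p) else rg) d).items
      = d.items ++ ps.filterMap (fun p => if val p ≠ [] then some (key p, val p) else none) := by
  induction ps generalizing d with
  | nil => simp
  | cons p ps ih =>
    simp only [List.map_cons, List.nodup_cons] at hnd
    simp only [List.foldl_cons, List.filterMap_cons]
    by_cases hne : val p ≠ []
    · have hfr : d.contains (key p) = false := hfresh p List.mem_cons_self
      have hstep : ∀ q ∈ ps, (d.insert (key p) (val p)).contains (key q) = false := by
        intro q hq
        rw [PySem.Dict.contains_insert]
        have hqp : ¬ key q = key p := fun h => hnd.1 (h ▸ List.mem_map_of_mem hq)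
        simp [hqp, hfresh q (List.mem_cons_of_mem p hq)]
      rw [if_pos hne, ih _ hstep hnd.2,
          PySem.Dict.items_insert_of_not_contains d (val p) hfr, List.append_assoc]
      simp [hne]
    · rw [if_neg hne, ih _ (fun q hq => hfresh q (List.mem_cons_of_mem p hq)) hnd.2]
      simp only [ne_eq, not_not] at hne
      simp [hne]

-- one step of Source B's mask loop, at the level of a single test bit
theorem pv_step_testBit (m i j : Nat) (b : Bool) :
    (if !(m.testBit i) && b then m ||| (1 <<< i) else m).testBit j
      = (m.testBit j || ((i == j) && b)) := by
  by_cases hij : i = j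
  · subst hij
    by_cases hmi : m.testBit i
    · simp [hmi]
    · by_cases hb : b <;>
        simp [hmi, hb, Nat.testBit_or, Nat.one_shiftLeft, Nat.testBit_two_pow_self]
  · have h2 : (2 ^ i).testBit j = false := Nat.testBit_two_pow_of_ne hij
    by_cases c : (!m.testBit i && b) <;>
      simp [c, Nat.testBit_or, Nat.one_shiftLeft, h2, hij]

-- the whole mask loop: bit j of the result says some pair (j, kw) in the table matched
theorem pv_fold_testBit (f : String → Bool) (l : List (Int × String)) (m j : Nat) :
    (l.foldl (fun mask p =>
        if !(mask.testBit p.1.toNat) && f p.2 then mask ||| (1 <<< p.1.toNat) else mask) m).testBit j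
      = (m.testBit j || l.any (fun p => (p.1.toNat == j) && f p.2)) := by
  induction l generalizing m with
  | nil => simp
  | cons p l ih =>
    simp only [List.foldl_cons, List.any_cons]
    rw [ih, pv_step_testBit, Bool.or_assoc]

-- bit j of a field's mask is exactly group j's keyword test (j = 0..5, concrete)
theorem pvMask_bit (name label : String) (j : Nat) (hj : j < 6) :
    (pvMaskOf name label).testBit j
      = ((pvGroupPatterns.getD j ("", [])).2).any
          (fun k => PySem.Str.isIn k name || PySem.Str.isIn k label) := by
  unfold pvMaskOf
  rw [pv_fold_testBit (fun s => PySem.Str.isIn s name || PySem.Str.isIn s label)]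
  interval_cases j <;>
    simp [pvFlat, pvGroupPatterns, PySem.List.enumerate]

-- the canonical result both programs produce
def pvResult (inputs : List (List (String × String))) : List (String × List (List (String × String))) :=
  pvGroupPatterns.filterMap (fun p =>
    if inputs.filter (pvMatch p.2) ≠ [] then some (p.1, inputs.filter (pvMatch p.2)) else none)

set_option maxHeartbeats 1000000 in
theorem pvA_eq (inputs : List (List (String × String))) :
    find_related_field_groups_py inputs = pvResult inputs := by
  unfold find_related_field_groups_py pvResult
  have hcong : ∀ (rg : PySem.Dict String (List (List (String × String))))
      (pat : String × List String), pat ∈ pvGroupPatterns →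
      (let matching_fields := inputs.foldl (fun mf input_elem =>
        let field_name := PySem.Str.lower ((PySem.Dict.mk input_elem).getD "name" "")
        let field_label := PySem.Str.lower ((PySem.Dict.mk input_elem).getD "label" "")
        if pat.2.any (fun keyword => PySem.Str.isIn keyword field_name || PySem.Str.isIn keyword field_label)
        then mf ++ [input_elem] else mf) []
       if matching_fields ≠ [] then rg.insert pat.1 matching_fields else rg)
      = (if inputs.filter (pvMatch pat.2) ≠ []
         then rg.insert pat.1 (inputs.filter (pvMatch pat.2)) else rg) := by
    intro rg pat _
    simp only [pvA_inner pat.2 inputs]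
  have h1 := PySem.List.foldl_congr_mem pvGroupPatterns _ _ PySem.Dict.empty hcong
  rw [h1]
  have h2 : (List.foldl (fun (rg : PySem.Dict String (List (List (String × String)))) (p : String × List String) =>
        if inputs.filter (pvMatch p.2) ≠ [] then rg.insert p.1 (inputs.filter (pvMatch p.2)) else rg)
        PySem.Dict.empty pvGroupPatterns).items
      = (PySem.Dict.empty : PySem.Dict String (List (List (String × String)))).items ++
        pvGroupPatterns.filterMap (fun p =>
          if inputs.filter (pvMatch p.2) ≠ [] then some (p.1, inputs.filter (pvMatch p.2)) else none) :=
    pv_insert_fold (fun p => p.1) (fun p => inputs.filter (pvMatch p.2)) pvGroupPatterns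
      PySem.Dict.empty (fun p _ => PySem.Dict.contains_empty (ν := List (List (String × String))) p.1) (by decide)
  rw [h2]
  rw [show (PySem.Dict.empty : PySem.Dict String (List (List (String × String)))).items = [] from rfl,
      List.nil_append]

set_option maxHeartbeats 1000000 in
theorem pvB_eq (inputs : List (List (String × String))) :
    find_related_field_groups_py_alt inputs = pvResult inputs := by
  simp only [find_related_field_groups_py_alt]
  rw [PySem.List.foldl_append_singleton_eq_map (f := fun e =>
      (pvMaskOf (PySem.Str.lower ((PySem.Dict.mk e).getD "name" ""))
                (PySem.Str.lower ((PySem.Dict.mk e).getD "label" "")), e)),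
      List.nil_append]
  have hcong : ∀ (rg : PySem.Dict String (List (List (String × String))))
      (ip : Int × (String × List String)), ip ∈ PySem.List.enumerate pvGroupPatterns →
      (let group := ((inputs.map (fun e =>
          (pvMaskOf (PySem.Str.lower ((PySem.Dict.mk e).getD "name" ""))
                    (PySem.Str.lower ((PySem.Dict.mk e).getD "label" "")), e))).filter
            (fun me => me.1.testBit ip.1.toNat)).map Prod.snd
       if group ≠ [] then rg.insert ip.2.1 group else rg)
      = (if inputs.filter (pvMatch ip.2.2) ≠ []
         then rg.insert ip.2.1 (inputs.filter (pvMatch ip.2.2)) else rg) := by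
    intro rg ip hip
    rw [PySem.List.mem_enumerate_iff] at hip
    obtain ⟨k, hk, hipk⟩ := hip
    have hk6 : k < 6 := by
      simpa [pvGroupPatterns] using hk
    have hgroup : ((inputs.map (fun e =>
          (pvMaskOf (PySem.Str.lower ((PySem.Dict.mk e).getD "name" ""))
                    (PySem.Str.lower ((PySem.Dict.mk e).getD "label" "")), e))).filter
            (fun me => me.1.testBit ip.1.toNat)).map Prod.snd
        = inputs.filter (pvMatch ip.2.2) := by
      subst hipk
      simp only [List.filter_map, List.map_map]
      have htoNat : ((0 : Int) + (k : Int)).toNat = k := by omega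
      have hfix : ∀ e ∈ inputs,
          ((fun me => Nat.testBit me.1 ((0 : Int) + (k : Int)).toNat) ∘ (fun e =>
            (pvMaskOf (PySem.Str.lower ((PySem.Dict.mk e).getD "name" ""))
                      (PySem.Str.lower ((PySem.Dict.mk e).getD "label" "")), e))) e
          = pvMatch (pvGroupPatterns[k].2) e := by
        intro e _
        simp only [Function.comp_apply, htoNat]
        rw [pvMask_bit _ _ k hk6]
        have hgetD : pvGroupPatterns.getD k ("", []) = pvGroupPatterns[k] :=
          List.getD_eq_getElem pvGroupPatterns ("", []) hk
        rw [hgetD]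
        rfl
      rw [List.filter_congr hfix]
      exact List.map_id _
    rw [hgroup]
  have h1 := PySem.List.foldl_congr_mem (PySem.List.enumerate pvGroupPatterns) _ _ PySem.Dict.empty hcong
  rw [h1]
  have h2 : (List.foldl (fun (rg : PySem.Dict String (List (List (String × String)))) (ip : Int × (String × List String)) =>
        if inputs.filter (pvMatch ip.2.2) ≠ [] then rg.insert ip.2.1 (inputs.filter (pvMatch ip.2.2)) else rg)
        PySem.Dict.empty (PySem.List.enumerate pvGroupPatterns)).items
      = (PySem.Dict.empty : PySem.Dict String (List (List (String × String)))).items ++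
        (PySem.List.enumerate pvGroupPatterns).filterMap (fun ip =>
          if inputs.filter (pvMatch ip.2.2) ≠ [] then some (ip.2.1, inputs.filter (pvMatch ip.2.2)) else none) :=
    pv_insert_fold (fun ip => ip.2.1) (fun ip => inputs.filter (pvMatch ip.2.2))
      (PySem.List.enumerate pvGroupPatterns) PySem.Dict.empty
      (fun p _ => PySem.Dict.contains_empty (ν := List (List (String × String))) p.2.1) (by decide)
  rw [h2]
  rw [show (PySem.Dict.empty : PySem.Dict String (List (List (String × String)))).items = [] from rfl,
      List.nil_append]
  unfold pvResult
  rw [show pvGroupPatterns = (PySem.List.enumerate pvGroupPatterns).map (·.2) from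
        (PySem.List.map_snd_enumerate pvGroupPatterns 0).symm, List.filterMap_map]
  rfl

-- ===== VERDICT (by name: the statement is the Claim_ definition above) =====
theorem find_related_field_groups_py_spec : Claim_equal_find_related_field_groups_py := by
  intro inputs _
  unfold Spec_find_related_field_groups_py
  rw [pvA_eq, pvB_eq]
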